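-- pv_equiv track=rewrite | github.com/YimingXiao98/Multimodal-RAG-Impact-Assessment | harvey_rag/app/core/eval/metrics.py | _calc_confusion
-- ===== SOURCE A (Python) =====
-- from typing import Dict, Iterable, Tuple
--
-- def _calc_confusion(y_true: Iterable[bool], y_pred: Iterable[bool]) -> Tuple[int, int, int, int]:
--     tp = fp = fn = tn = 0
--     for truth, pred in zip(y_true, y_pred):
--         if truth and pred:
--             tp += 1
--         elif not truth and pred:
--             fp += 1
--         elif truth and not pred:
--             fn += 1
--         else:
--             tn += 1
--     return tp, fp, fn, tn
-- ===== SOURCE B (Python) =====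
-- from typing import Iterable, Tuple
--
-- def _calc_confusion(y_true: Iterable[bool], y_pred: Iterable[bool]) -> Tuple[int, int, int, int]:
--     # Inclusion-exclusion: from the pair count n and the marginals t (actual
--     # positives), p (predicted positives) and the joint tp, every cell follows
--     # arithmetically. Correct because the four cells partition the n pairs:
--     # fp = p - tp, fn = t - tp, tn = n - t - p + tp.
--     pairs = list(zip(y_true, y_pred))
--     n = len(pairs)
--     t = sum(1 for a, _ in pairs if a)
--     p = sum(1 for _, b in pairs if b)
--     tp = sum(1 for a, b in pairs if a and b)
--     return (tp, p - tp, t - tp, n - t - p + tp)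
-- ===== Notes on version B (the rewrite author's own statement) =====
-- stated objective: alternative
-- what changed: Replaces the four-way branching loop over four accumulators by computing the length and three marginal counts (actual positives, predicted positives, joint positives) and deriving fp, fn, tn by inclusion-exclusion arithmetic.
import Mathlib
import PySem

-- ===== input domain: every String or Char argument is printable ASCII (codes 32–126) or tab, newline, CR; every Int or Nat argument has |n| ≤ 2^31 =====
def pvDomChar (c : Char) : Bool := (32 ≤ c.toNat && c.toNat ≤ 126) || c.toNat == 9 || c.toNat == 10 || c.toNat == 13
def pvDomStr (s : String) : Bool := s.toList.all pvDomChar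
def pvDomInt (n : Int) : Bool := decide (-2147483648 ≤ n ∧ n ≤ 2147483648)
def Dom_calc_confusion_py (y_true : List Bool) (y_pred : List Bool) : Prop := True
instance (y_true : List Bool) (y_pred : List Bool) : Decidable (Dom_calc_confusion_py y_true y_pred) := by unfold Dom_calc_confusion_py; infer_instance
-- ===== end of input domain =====

-- B derives fp, fn, tn by inclusion-exclusion from the length and three marginal counts instead of A's four-way branching loop (alternative; same cost).

-- ===== PORT A =====
def calc_confusion_py (y_true : List Bool) (y_pred : List Bool) : Int × Int × Int × Int :=
  (y_true.zip y_pred).foldl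
    (fun s tp =>
      match s, tp with
      | (tp', fp, fn, tn), (truth, pred) =>
        if truth && pred then (tp' + 1, fp, fn, tn)
        else if !truth && pred then (tp', fp + 1, fn, tn)
        else if truth && !pred then (tp', fp, fn + 1, tn)
        else (tp', fp, fn, tn + 1))
    (0, 0, 0, 0)

-- ===== PORT B =====
def calc_confusion_py_alt (y_true : List Bool) (y_pred : List Bool) : Int × Int × Int × Int :=
  let pairs := y_true.zip y_pred
  let n : Int := pairs.length
  let t : Int := pairs.countP (fun x => x.1)
  let p : Int := pairs.countP (fun x => x.2)
  let tp : Int := pairs.countP (fun x => x.1 && x.2)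
  (tp, p - tp, t - tp, n - t - p + tp)

-- ===== PRECONDITION & SPEC =====
def Spec_calc_confusion_py (y_true : List Bool) (y_pred : List Bool) (out : Int × Int × Int × Int) : Prop := out = calc_confusion_py_alt y_true y_pred
instance (y_true : List Bool) (y_pred : List Bool) (out : Int × Int × Int × Int) : Decidable (Spec_calc_confusion_py y_true y_pred out) := by unfold Spec_calc_confusion_py; infer_instance

-- ===== CLAIM =====
def Claim_equal_calc_confusion_py : Prop := ∀ (y_true : List Bool) (y_pred : List Bool), Dom_calc_confusion_py y_true y_pred → Spec_calc_confusion_py y_true y_pred (calc_confusion_py y_true y_pred)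

-- ===== LEMMAS AND PROOFS =====

-- A's loop, started from an arbitrary accumulator, adds B's quantities (as Nat arithmetic pushed to Int).
theorem calc_confusion_foldl_eq (l : List (Bool × Bool)) (a b c d : Int) :
    l.foldl
      (fun s tp =>
        match s, tp with
        | (tp', fp, fn, tn), (truth, pred) =>
          if truth && pred then (tp' + 1, fp, fn, tn)
          else if !truth && pred then (tp', fp + 1, fn, tn)
          else if truth && !pred then (tp', fp, fn + 1, tn)
          else (tp', fp, fn, tn + 1))
      (a, b, c, d)
    = (a + l.countP (fun x => x.1 && x.2),
       b + (l.countP (fun x => x.2) - l.countP (fun x => x.1 && x.2) : Int),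
       c + (l.countP (fun x => x.1) - l.countP (fun x => x.1 && x.2) : Int),
       d + ((l.length : Int) - l.countP (fun x => x.1) - l.countP (fun x => x.2)
            + l.countP (fun x => x.1 && x.2))) := by
  induction l generalizing a b c d with
  | nil => simp
  | cons hd tl ih =>
    obtain ⟨t, p⟩ := hd
    cases t <;> cases p <;>
      (simp only [List.foldl_cons]; rw [ih];
       simp [List.countP_cons, Prod.ext_iff]; omega)

-- ===== VERDICT =====
theorem calc_confusion_py_spec : Claim_equal_calc_confusion_py := by
  intro y_true y_pred _
  unfold Spec_calc_confusion_py calc_confusion_py calc_confusion_py_alt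
  rw [calc_confusion_foldl_eq]
  simp
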